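-- pv_equiv track=rewrite | github.com/mervinejo21/KWC_2 | 11_randomizing_paintings.py | fast_greedy
-- ===== SOURCE A (Python) =====
-- from typing import List, Dict, Set, Tuple
-- import heapq
--
-- def fast_greedy(frames: List[List[int]], tags_cache: Dict[int, Set[str]]) -> List[List[int]]:
--     """
--     Faster greedy ordering of frames using a priority queue.
--     """
--     ordered = [frames.pop(0)]
--     heap = []
--
--     current_tags = set.union(*[tags_cache[idx] for idx in ordered[-1]])
--     for frame in frames:
--         candidate_tags = set.union(*[tags_cache[idx] for idx in frame])
--         common = len(current_tags & candidate_tags)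
--         unique_current = len(current_tags - candidate_tags)
--         unique_candidate = len(candidate_tags - current_tags)
--         score = -min(common, unique_current, unique_candidate)
--         heapq.heappush(heap, (score, frame))
--
--     while heap:
--         _, best_frame = heapq.heappop(heap)
--         ordered.append(best_frame)
--         frames.remove(best_frame)
--
--         current_tags = set.union(*[tags_cache[idx] for idx in ordered[-1]])
--         heap = []
--         for frame in frames:
--             candidate_tags = set.union(*[tags_cache[idx] for idx in frame])
--             common = len(current_tags & candidate_tags)
--             unique_current = len(current_tags - candidate_tags)
--             unique_candidate = len(candidate_tags - current_tags)
--             score = -min(common, unique_current, unique_candidate)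
--             heapq.heappush(heap, (score, frame))
--
--     return ordered
-- ===== SOURCE B (Python) =====
-- def fast_greedy(frames, tags_cache):
--     """Greedy reordering, same return value as A: caches every frame's tag union once and
--     picks each next frame by a direct first-min index scan (no heap, no per-round union
--     recomputation); uses |cur|-common / |cand|-common instead of two set differences.
--     Unlike A it does not mutate the caller's frames list (return value is identical)."""
--     first, rest = frames[0], frames[1:]
--     ordered = [first]
--     current_tags = set.union(*[tags_cache[i] for i in first])
--     remaining = [(set.union(*[tags_cache[i] for i in f]), f) for f in rest]
--     while remaining:
--         best_i, best_key = 0, None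
--         for i, (tags, f) in enumerate(remaining):
--             common = len(current_tags & tags)
--             key = (-min(common, len(current_tags) - common, len(tags) - common), f)
--             if best_key is None or key < best_key:
--                 best_i, best_key = i, key
--         current_tags, best = remaining.pop(best_i)
--         ordered.append(best)
--     return ordered
-- ===== Notes on version B (the rewrite author's own statement) =====
-- stated objective: alternative
-- what changed: B replaces the heap that A rebuilds from scratch every round with a one-time cache of each frame's tag union plus a direct first-min index scan, and computes the two unique-counts arithmetically (len-common) instead of with two set differences; B also does not mutate the caller's frames list (A empties it).
import Mathlib
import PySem

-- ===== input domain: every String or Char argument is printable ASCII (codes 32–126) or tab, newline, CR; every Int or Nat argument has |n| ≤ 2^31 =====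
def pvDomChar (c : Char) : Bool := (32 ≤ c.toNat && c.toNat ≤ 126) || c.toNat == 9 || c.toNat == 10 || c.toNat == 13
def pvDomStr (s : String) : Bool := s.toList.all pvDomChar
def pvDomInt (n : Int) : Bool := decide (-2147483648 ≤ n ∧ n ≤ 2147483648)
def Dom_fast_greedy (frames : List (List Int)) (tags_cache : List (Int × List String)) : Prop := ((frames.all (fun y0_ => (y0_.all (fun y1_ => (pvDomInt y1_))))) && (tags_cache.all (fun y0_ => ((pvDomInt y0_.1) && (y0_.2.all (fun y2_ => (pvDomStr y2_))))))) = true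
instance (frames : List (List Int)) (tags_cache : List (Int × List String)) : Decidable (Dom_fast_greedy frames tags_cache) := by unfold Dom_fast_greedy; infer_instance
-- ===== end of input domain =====

-- B caches every frame's tag union once and selects each next frame by a direct first-min
-- scan (no heap rebuild, no set differences); same return value. A empties the caller's
-- `frames` list in place, B does not mutate it: the equivalence is about the return value.

-- ===== PORT A =====

-- Python tuple comparison (score, frame) < (score, frame): lexicographic, lists elementwise.
def listLt : List Int → List Int → Bool
  | [], [] => false
  | [], _ :: _ => true
  | _ :: _, [] => false
  | x :: xs, y :: ys => if x < y then true else if x = y then listLt xs ys else false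

def keyLt (a b : Int × List Int) : Bool :=
  if a.1 < b.1 then true else if a.1 = b.1 then listLt a.2 b.2 else false

-- set.union(*[tags_cache[idx] for idx in frame]); tags_cache[idx] with a missing key is a
-- KeyError in Python — excluded by Pre_, the default [] is only a totalization guard.
def tagUnion (tags_cache : List (Int × List String)) (frame : List Int) : List String :=
  frame.foldl (fun acc idx => PySem.Set.union acc ((PySem.Dict.mk tags_cache).getD idx [])) []

-- score = -min(len(cur & cand), len(cur - cand), len(cand - cur))
def score (cur cand : List String) : Int :=
  let common : Int := (PySem.Set.len (PySem.Set.inter cur cand) : Int);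
  let uc : Int := (PySem.Set.len (PySem.Set.diff cur cand) : Int);
  let ucand : Int := (PySem.Set.len (PySem.Set.diff cand cur) : Int);
  -(min common (min uc ucand))

-- heapq.heappop returns the minimum (score, frame) tuple; tuple order is total, so the
-- popped VALUE is exactly the minimum — ported as a min computation (the rest of the heap
-- is discarded by A immediately afterwards).
def heapMin (h : Int × List Int) (hs : List (Int × List Int)) : Int × List Int :=
  match hs with
  | [] => h
  | x :: xs => let m := heapMin x xs; if keyLt m h then m else h

-- frames.remove(best): removes the first occurrence (always present here).
def removeFirst : List (List Int) → List Int → List (List Int)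
  | [], _ => []
  | x :: xs, b => if x = b then xs else x :: removeFirst xs b

-- the `while heap:` loop; fuel = number of remaining frames (each round removes exactly one).
def loopA (tc : List (Int × List String)) : Nat → List (List Int) → List (List Int) →
    List (Int × List Int) → List (List Int)
  | _, ordered, _, [] => ordered
  | 0, ordered, _, _ :: _ => ordered
  | fuel + 1, ordered, frames, h :: hs =>
    let best := heapMin h hs
    let ordered' := ordered ++ [best.2]
    let frames' := removeFirst frames best.2
    let cur := tagUnion tc best.2
    loopA tc fuel ordered' frames' (frames'.map (fun f => (score cur (tagUnion tc f), f)))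

def fast_greedy (frames : List (List Int)) (tags_cache : List (Int × List String)) : List (List Int) :=
  match frames with
  | [] => []  -- Python raises IndexError on frames.pop(0); excluded by Pre_
  | first :: rest =>
    let cur := tagUnion tags_cache first
    loopA tags_cache rest.length [first] rest
      (rest.map (fun f => (score cur (tagUnion tags_cache f), f)))

-- ===== PORT B =====

-- B's score: only the intersection is computed; uniques are len(cur)-common / len(tags)-common.
def scoreB (cur cand : List String) : Int :=
  let common : Int := (PySem.Set.len (PySem.Set.inter cur cand) : Int);
  -(min common (min ((PySem.Set.len cur : Int) - common) ((PySem.Set.len cand : Int) - common)))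

-- first-min scan + pop at that index, as one structural recursion over the cached entries:
-- returns (best entry, remaining entries in order).
def selectMin (cur : List String) (e : List String × List Int)
    (es : List (List String × List Int)) :
    (List String × List Int) × List (List String × List Int) :=
  match es with
  | [] => (e, [])
  | e' :: es' =>
    let r := selectMin cur e' es'
    if keyLt (scoreB cur r.1.1, r.1.2) (scoreB cur e.1, e.2)
    then (r.1, e :: r.2) else (e, e' :: es')

def loopB (tc : List (Int × List String)) : Nat → List String → List (List Int) →
    List (List String × List Int) → List (List Int)
  | _, _, ordered, [] => ordered
  | 0, _, ordered, _ :: _ => ordered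
  | fuel + 1, cur, ordered, e :: es =>
    let r := selectMin cur e es
    loopB tc fuel r.1.1 (ordered ++ [r.1.2]) r.2

def fast_greedy_alt (frames : List (List Int)) (tags_cache : List (Int × List String)) : List (List Int) :=
  match frames with
  | [] => []  -- frames[0] raises IndexError; excluded by Pre_
  | first :: rest =>
    loopB tags_cache rest.length (tagUnion tags_cache first) [first]
      (rest.map (fun f => (tagUnion tags_cache f, f)))

-- ===== PRECONDITION & SPEC =====
-- A raises outside Pre_: IndexError on empty frames, TypeError on an empty frame
-- (set.union with no sets), KeyError on a frame index missing from tags_cache.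
def Pre_fast_greedy (frames : List (List Int)) (tags_cache : List (Int × List String)) : Prop :=
  frames ≠ [] ∧ ∀ f ∈ frames, f ≠ [] ∧ ∀ idx ∈ f, ((PySem.Dict.mk tags_cache).get? idx).isSome
instance (frames : List (List Int)) (tags_cache : List (Int × List String)) : Decidable (Pre_fast_greedy frames tags_cache) := by unfold Pre_fast_greedy; infer_instance

def pvWitness_fast_greedy : List (List Int) × (List (Int × List String)) :=
  ([[0], [1], [0, 1]], [(0, ["a", "b"]), (1, ["b", "c"])])

def Spec_fast_greedy (frames : List (List Int)) (tags_cache : List (Int × List String)) (out : List (List Int)) : Prop := out = fast_greedy_alt frames tags_cache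
instance (frames : List (List Int)) (tags_cache : List (Int × List String)) (out : List (List Int)) : Decidable (Spec_fast_greedy frames tags_cache out) := by unfold Spec_fast_greedy; infer_instance

-- ===== CLAIM (what is proved, stated in full; the proofs are below) =====
def Claim_equal_fast_greedy : Prop := ∀ (frames : List (List Int)) (tags_cache : List (Int × List String)), Dom_fast_greedy frames tags_cache → Pre_fast_greedy frames tags_cache → Spec_fast_greedy frames tags_cache (fast_greedy frames tags_cache)

-- ===== LEMMAS AND PROOFS =====

-- ghost selection on bare frames: (first frame of minimal key, the others in order)
def selG (k : List Int → Int) (f : List Int) (fs : List (List Int)) :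
    List Int × List (List Int) :=
  match fs with
  | [] => (f, [])
  | g :: gs =>
    let r := selG k g gs
    if keyLt (k r.1, r.1) (k f, f) then (r.1, f :: r.2) else (f, g :: gs)

theorem listLt_irrefl (l : List Int) : listLt l l = false := by
  induction l with
  | nil => rfl
  | cons x xs ih => simp [listLt, ih]

theorem keyLt_irrefl (a : Int × List Int) : keyLt a a = false := by
  simp [keyLt, listLt_irrefl]

theorem tagUnion_nodup (tc : List (Int × List String)) (frame : List Int) :
    (tagUnion tc frame).Nodup := by
  have h : ∀ (fr : List Int) (acc : List String), acc.Nodup →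
      (fr.foldl (fun acc idx => PySem.Set.union acc ((PySem.Dict.mk tc).getD idx [])) acc).Nodup := by
    intro fr
    induction fr with
    | nil => intro acc h; exact h
    | cons i is ih => intro acc h; exact ih _ (PySem.Set.nodup_union _ _ h)
  exact h frame [] List.nodup_nil

-- |s ∩ t| is symmetric for duplicate-free lists (both are Python sets here)
theorem inter_len_comm (a b : List String) (ha : a.Nodup) (hb : b.Nodup) :
    (PySem.Set.len (PySem.Set.inter a b) : Int) = (PySem.Set.len (PySem.Set.inter b a) : Int) := by
  have key : ∀ (x y : List String), x.Nodup → y.Nodup →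
      (x.filter (fun e => PySem.Set.contains y e)).length = (x.toFinset ∩ y.toFinset).card := by
    intro x y hx hy
    rw [← List.toFinset_card_of_nodup (hx.filter _), List.toFinset_filter]
    congr 1
    rw [← Finset.filter_mem_eq_inter]
    apply Finset.filter_congr
    intro e _
    simp
  have hinter : ∀ (x y : List String), PySem.Set.inter x y = x.filter (fun e => PySem.Set.contains y e) := by
    intro x y; rfl
  simp only [PySem.Set.len, hinter]
  rw [key a b ha hb, key b a hb ha, Finset.inter_comm]

-- A's score (three set operations) equals B's score (one intersection + arithmetic)
theorem score_eq_scoreB (cur cand : List String) (hc : cur.Nodup) (hd : cand.Nodup) :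
    score cur cand = scoreB cur cand := by
  have hsplit : ∀ (x y : List String),
      (PySem.Set.len (PySem.Set.inter x y) : Int) + (PySem.Set.len (PySem.Set.diff x y) : Int)
        = (PySem.Set.len x : Int) := by
    intro x y
    have := List.length_eq_length_filter_add (l := x) (fun e => PySem.Set.contains y e)
    simp only [PySem.Set.len, PySem.Set.inter, PySem.Set.diff]
    omega
  have h1 := hsplit cur cand
  have h2 := hsplit cand cur
  have h3 := inter_len_comm cur cand hc hd
  simp only [score, scoreB]
  omega

-- heapMin over the keyed heap picks exactly selG's (key, frame) pair
theorem heapMin_eq_selG (k : List Int → Int) (f : List Int) (fs : List (List Int)) :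
    heapMin (k f, f) (fs.map (fun g => (k g, g))) = (k (selG k f fs).1, (selG k f fs).1) := by
  induction fs generalizing f with
  | nil => rfl
  | cons g gs ih =>
    simp only [List.map, heapMin, selG, ih g]
    by_cases h : keyLt (k (selG k g gs).1, (selG k g gs).1) (k f, f) = true
    · simp [h]
    · simp [h]

-- removing selG's chosen frame (first occurrence) leaves exactly selG's remainder
theorem removeFirst_selG (k : List Int → Int) (f : List Int) (fs : List (List Int)) :
    removeFirst (f :: fs) (selG k f fs).1 = (selG k f fs).2 := by
  induction fs generalizing f with
  | nil => simp [selG, removeFirst]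
  | cons g gs ih =>
    cases h : keyLt (k (selG k g gs).1, (selG k g gs).1) (k f, f) with
    | true =>
      have hne : ¬ (f = (selG k g gs).1) := by
        intro he
        rw [he] at h
        rw [keyLt_irrefl] at h
        exact Bool.false_ne_true h
      simp only [selG, h, if_true]
      simp only [removeFirst, if_neg hne]
      rw [← ih g]
      rfl
    | false =>
      simp [selG, h, removeFirst]

-- B's selectMin on cached entries is selG on the frames (keys via tagUnion / A's score)
theorem selectMin_eq_selG (tc : List (Int × List String)) (cur : List String)
    (hcur : cur.Nodup) (f : List Int) (fs : List (List Int)) :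
    selectMin cur (tagUnion tc f, f) (fs.map (fun g => (tagUnion tc g, g)))
      = ((tagUnion tc (selG (fun g => score cur (tagUnion tc g)) f fs).1,
          (selG (fun g => score cur (tagUnion tc g)) f fs).1),
         ((selG (fun g => score cur (tagUnion tc g)) f fs).2).map (fun g => (tagUnion tc g, g))) := by
  induction fs generalizing f with
  | nil => rfl
  | cons g gs ih =>
    simp only [List.map, selectMin, selG, ih g]
    rw [← score_eq_scoreB cur (tagUnion tc (selG (fun g => score cur (tagUnion tc g)) g gs).1)
          hcur (tagUnion_nodup tc _),
        ← score_eq_scoreB cur (tagUnion tc f) hcur (tagUnion_nodup tc f)]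
    by_cases h : keyLt (score cur (tagUnion tc (selG (fun g => score cur (tagUnion tc g)) g gs).1),
        (selG (fun g => score cur (tagUnion tc g)) g gs).1) (score cur (tagUnion tc f), f) = true
    · simp [h]
    · simp [h]

-- the two loops agree whenever A's heap is the keyed image and B's entries the cached image
theorem loop_eq (tc : List (Int × List String)) (fuel : Nat) :
    ∀ (ordered : List (List Int)) (fs : List (List Int)) (cur : List String), cur.Nodup →
    loopA tc fuel ordered fs (fs.map (fun f => (score cur (tagUnion tc f), f)))
      = loopB tc fuel cur ordered (fs.map (fun f => (tagUnion tc f, f))) := by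
  induction fuel with
  | zero => intro ordered fs cur _; cases fs <;> rfl
  | succ n ih =>
    intro ordered fs cur hcur
    cases fs with
    | nil => rfl
    | cons f fs' =>
      simp only [List.map, loopA, loopB]
      rw [heapMin_eq_selG (fun g => score cur (tagUnion tc g)) f fs',
          selectMin_eq_selG tc cur hcur f fs']
      rw [removeFirst_selG (fun g => score cur (tagUnion tc g)) f fs']
      exact ih _ _ _ (tagUnion_nodup tc _)

-- ===== VERDICT (by name: the statement is the Claim_ definition above) =====
theorem fast_greedy_spec : Claim_equal_fast_greedy := by
  intro frames tags_cache _ _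
  unfold Spec_fast_greedy
  cases frames with
  | nil => rfl
  | cons first rest =>
    simp only [fast_greedy, fast_greedy_alt]
    exact loop_eq tags_cache rest.length [first] rest (tagUnion tags_cache first)
      (tagUnion_nodup tags_cache first)
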